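-- pv_equiv track=rewrite | github.com/ooMia/BOJ | 프로그래머스/1/140108. 문자열 나누기/문자열 나누기.py | parse
-- ===== SOURCE A (Python) =====
-- def parse(s: str) -> str:
--     """
--     첫 번째 문자의 출현 빈도와 그 외 다른 문자들의 출현 빈도가 같아질 때 문자열을 분리합니다.
--     예를 들어, "aabcab"는 "aabc"와 "ab"로 분리됩니다.
--     문자열에서 더 이상 읽을 글자가 없다면, 그 시점에서 분리합니다.
--     :param s: 전체 문자열
--     :return: 분해 후 남은 부분 문자열
--     """
--     if len(s) <= 2:
--         return ""
--
--     s = list(s)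
--     first_ch, other_ch = s.pop(0), -1
--     ch_table = {first_ch: 1, other_ch: 0}
--
--     while s:
--         ch = s.pop(0)
--         if ch != first_ch:
--             ch = other_ch
--         ch_table[ch] += 1
--         if ch_table[first_ch] == ch_table[other_ch]:
--             break
--
--     return "".join(s)
-- ===== SOURCE B (Python) =====
-- def parse(s: str) -> str:
--     if len(s) <= 2:
--         return ""
--     f = s[0]
--     diff = 1  # (count of first char) - (count of other chars), over s[:i+1]
--     for i in range(1, len(s)):
--         diff += 1 if s[i] == f else -1
--         if diff == 0:
--             return s[i + 1:]
--     return ""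
-- ===== Notes on version B (the rewrite author's own statement) =====
-- stated objective: faster
-- what changed: Replaces A's list-conversion with repeated pop(0) and a dict of two counters by a single index scan keeping one running difference counter and returning a slice of the remainder.
import Mathlib
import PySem

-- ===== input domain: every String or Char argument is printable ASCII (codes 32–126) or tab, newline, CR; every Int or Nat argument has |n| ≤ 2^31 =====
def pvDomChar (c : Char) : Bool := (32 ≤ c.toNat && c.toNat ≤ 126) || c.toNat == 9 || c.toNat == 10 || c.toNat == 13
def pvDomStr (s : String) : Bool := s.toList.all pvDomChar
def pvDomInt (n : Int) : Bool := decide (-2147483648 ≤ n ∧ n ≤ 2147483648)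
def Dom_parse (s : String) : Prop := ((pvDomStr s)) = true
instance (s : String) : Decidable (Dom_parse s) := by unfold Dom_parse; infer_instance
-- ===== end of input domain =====

-- B replaces A's repeated pop(0) on a list plus a two-key counter dict by a single
-- index scan with one running difference counter, returning a slice (objective: faster).

-- ===== PORT A =====
-- A's dict has keys first_ch (a str) and -1 (an int); the int sentinel -1 never equals a
-- str key in Python, so it is encoded exactly as `none : Option Char` (first_ch = some f).
def parseALoop (first : Char) (d : PySem.Dict (Option Char) Int) : List Char → List Char
  | [] => []
  | c :: rest =>
    let key : Option Char := if c ≠ first then none else some c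
    let d' := d.modify key 0 (· + 1)
    if d'.getD (some first) 0 = d'.getD none 0 then rest
    else parseALoop first d' rest

def parse (s : String) : String :=
  if PySem.Str.len s ≤ 2 then "" else
  match s.toList with
  | [] => ""   -- unreachable: len s > 2
  | f :: rest =>
      let d : PySem.Dict (Option Char) Int :=
        (PySem.Dict.empty.insert (some f) 1).insert none 0
      String.mk (parseALoop f d rest)

-- ===== PORT B =====
def parseBLoop (t : List Char) (f : Char) (i : Nat) (diff : Int) : List Char :=
  if h : i < t.length then
    let diff' := diff + (if t[i] = f then 1 else -1)
    if diff' = 0 then t.drop (i + 1)   -- s[i+1:]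
    else parseBLoop t f (i + 1) diff'
  else []
termination_by t.length - i

def parse_alt (s : String) : String :=
  if PySem.Str.len s ≤ 2 then "" else
  match s.toList with
  | [] => ""   -- unreachable: len s > 2
  | f :: _ => String.mk (parseBLoop s.toList f 1 1)

-- ===== PRECONDITION & SPEC =====
def Spec_parse (s : String) (out : String) : Prop := out = parse_alt s
instance (s : String) (out : String) : Decidable (Spec_parse s out) := by unfold Spec_parse; infer_instance

-- ===== CLAIM (what is proved, stated in full; the proofs are below) =====
def Claim_equal_parse : Prop := ∀ (s : String), Dom_parse s → Spec_parse s (parse s)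

-- ===== LEMMAS AND PROOFS =====

lemma loop_eq (f : Char) : ∀ (r t : List Char) (i : Nat) (d : PySem.Dict (Option Char) Int),
    t.drop i = r →
    parseALoop f d r = parseBLoop t f i (d.getD (some f) 0 - d.getD none 0) := by
  intro r
  induction r with
  | nil =>
    intro t i d hdrop
    have hlen : t.length ≤ i := by
      by_contra hlt
      have := List.drop_eq_nil_iff.mp hdrop
      omega
    rw [parseALoop, parseBLoop]
    simp [Nat.not_lt.mpr hlen]
  | cons c r' ih =>
    intro t i d hdrop
    have hi : i < t.length := by
      by_contra hge
      rw [List.drop_eq_nil_iff.mpr (by omega)] at hdrop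
      simp at hdrop
    have hget : t[i] = c := by
      have : (t.drop i)[0]'(by rw [hdrop]; simp) = c := by simp [hdrop]
      simpa using this
    have hdrop' : t.drop (i + 1) = r' := by
      rw [← List.tail_drop, hdrop]
      rfl
    rw [parseALoop, parseBLoop]
    simp only [dif_pos hi, hget]
    by_cases hc : c = f
    · have hkey : (if c ≠ f then (none : Option Char) else some c) = some f := by
        simp [hc]
      rw [hkey, if_pos hc]
      rw [PySem.Dict.getD_modify_self, PySem.Dict.getD_modify_of_ne _ _ _ (by simp)]
      by_cases heq : d.getD (some f) 0 + 1 = d.getD none 0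
      · rw [if_pos heq, if_pos (by omega), hdrop']
      · rw [if_neg heq, if_neg (by omega)]
        have := ih t (i + 1) (d.modify (some f) 0 (· + 1)) hdrop'
        rw [this, PySem.Dict.getD_modify_self,
            PySem.Dict.getD_modify_of_ne _ _ _ (by simp)]
        congr 1; omega
    · have hkey : (if c ≠ f then (none : Option Char) else some c) = none := by
        simp [hc]
      rw [hkey, if_neg hc]
      rw [PySem.Dict.getD_modify_self, PySem.Dict.getD_modify_of_ne _ _ _ (by simp)]
      by_cases heq : d.getD (some f) 0 = d.getD none 0 + 1
      · rw [if_pos heq, if_pos (by omega), hdrop']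
      · rw [if_neg heq, if_neg (by omega)]
        have := ih t (i + 1) (d.modify none 0 (· + 1)) hdrop'
        rw [this, PySem.Dict.getD_modify_self,
            PySem.Dict.getD_modify_of_ne _ _ _ (by simp)]
        congr 1; omega

-- ===== VERDICT (by name: the statement is the Claim_ definition above) =====
theorem parse_spec : Claim_equal_parse := by
  intro s _
  unfold Spec_parse parse parse_alt
  by_cases hlen : PySem.Str.len s ≤ 2
  · rw [if_pos hlen, if_pos hlen]
  · rw [if_neg hlen, if_neg hlen]
    cases h : s.toList with
    | nil => rfl
    | cons f rest =>
      show String.mk (parseALoop f ((PySem.Dict.empty.insert (some f) 1).insert none 0) rest)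
         = String.mk (parseBLoop (f :: rest) f 1 1)
      rw [loop_eq f rest (f :: rest) 1 _ rfl]
      simp [PySem.Dict.getD_insert]
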